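-- pv_equiv track=rewrite | github.com/agruber/insect-pol-iii | scripts/align_promoters.py | find_anchor_positions
-- ===== SOURCE A (Python) =====
-- from typing import List, Tuple, Dict, Set, Optional
--
-- def find_anchor_positions(sequences: List[str], anchor_kmers: Set[str], k: int) -> List[Optional[int]]:
--     """
--     Find positions of anchor k-mers in each sequence.
--
--     Args:
--         sequences: List of DNA sequences
--         anchor_kmers: Set of k-mers to search for
--         k: k-mer length
--
--     Returns:
--         List of positions (or None if not found) for each sequence
--     """
--     positions = []
--
--     for seq in sequences:
--         seq_upper = seq.upper()
--         best_pos = None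
--
--         # Search for any anchor k-mer
--         for kmer in anchor_kmers:
--             pos = seq_upper.find(kmer)
--             if pos != -1:
--                 if best_pos is None or pos < best_pos:
--                     best_pos = pos
--
--         positions.append(best_pos)
--
--     return positions
-- ===== SOURCE B (Python) =====
-- def find_anchor_positions(sequences, anchor_kmers, k):
--     """Positional left-to-right scan: for each sequence, walk the offsets and
--     stop at the first offset where some anchor k-mer starts (startswith with
--     the whole tuple of k-mers and an offset)."""
--     kmers = tuple(anchor_kmers)
--     positions = []
--     for seq in sequences:
--         seq_upper = seq.upper()
--         found = None
--         for i in range(len(seq_upper) + 1):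
--             if seq_upper.startswith(kmers, i):
--                 found = i
--                 break
--         positions.append(found)
--     return positions
-- ===== Notes on version B (the rewrite author's own statement) =====
-- stated objective: faster
-- what changed: Instead of running str.find once per k-mer over the whole sequence and minimising the hits, B scans each sequence's offsets left to right and stops at the first offset where any anchor k-mer starts (one startswith call on the whole k-mer tuple per offset), so the per-k-mer full scans and the minimisation disappear and the scan ends at the answer.
import Mathlib
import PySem

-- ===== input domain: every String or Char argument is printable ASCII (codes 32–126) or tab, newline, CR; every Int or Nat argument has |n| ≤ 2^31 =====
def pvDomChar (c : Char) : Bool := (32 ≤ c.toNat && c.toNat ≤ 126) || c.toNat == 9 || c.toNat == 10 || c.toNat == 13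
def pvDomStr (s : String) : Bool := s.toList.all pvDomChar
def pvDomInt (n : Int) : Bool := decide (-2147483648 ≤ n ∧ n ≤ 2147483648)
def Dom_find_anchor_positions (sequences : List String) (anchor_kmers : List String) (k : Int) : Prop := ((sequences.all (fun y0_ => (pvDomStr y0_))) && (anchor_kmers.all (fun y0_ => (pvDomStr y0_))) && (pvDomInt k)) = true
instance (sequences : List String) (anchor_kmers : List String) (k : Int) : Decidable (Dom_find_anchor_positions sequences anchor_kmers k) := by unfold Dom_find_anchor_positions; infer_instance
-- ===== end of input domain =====

-- B replaces A's per-k-mer str.find scans + running minimum by a single left-to-right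
-- offset scan (one tuple-startswith per offset) stopping at the first matching offset; a timing run measured B faster on its large inputs.


-- ===== PORT A =====
-- inner loop body: pos = seq_upper.find(kmer); if pos != -1: if best_pos is None or pos < best_pos: best_pos = pos
def pvStepA (seq_upper : String) (best_pos : Option Int) (kmer : String) : Option Int :=
  let pos := PySem.Str.find seq_upper kmer
  if pos ≠ -1 then
    match best_pos with
    | none => some pos
    | some b => if pos < b then some pos else some b
  else best_pos

def find_anchor_positions (sequences : List String) (anchor_kmers : List String) (k : Int) : List (Option Int) :=
  sequences.map (fun seq =>
    let seq_upper := PySem.Str.upper seq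
    anchor_kmers.foldl (pvStepA seq_upper) none)

-- ===== PORT B =====
-- seq_upper.startswith(kmers_tuple, i) with 0 ≤ i ≤ len: ported by hand as 'some k-mer is a prefix of su.drop i' (exact there)
def pvHasAnchorAt (su : List Char) (kmers : List String) (i : Nat) : Bool :=
  kmers.any (fun kmer => decide (kmer.toList <+: su.drop i))

-- for i in range(len(su)+1): if any(...): found = i; break
def find_anchor_positions_alt (sequences : List String) (anchor_kmers : List String) (k : Int) : List (Option Int) :=
  sequences.map (fun seq =>
    let su := (PySem.Str.upper seq).toList
    ((List.range (su.length + 1)).find? (fun i => pvHasAnchorAt su anchor_kmers i)).map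
      (fun i => (i : Int)))

-- ===== PRECONDITION & SPEC =====
def Spec_find_anchor_positions (sequences : List String) (anchor_kmers : List String) (k : Int) (out : List (Option Int)) : Prop := out = find_anchor_positions_alt sequences anchor_kmers k
instance (sequences : List String) (anchor_kmers : List String) (k : Int) (out : List (Option Int)) : Decidable (Spec_find_anchor_positions sequences anchor_kmers k out) := by unfold Spec_find_anchor_positions; infer_instance

-- ===== CLAIM (what is proved, stated in full; the proofs are below) =====
def Claim_equal_find_anchor_positions : Prop := ∀ (sequences : List String) (anchor_kmers : List String) (k : Int), Dom_find_anchor_positions sequences anchor_kmers k → Spec_find_anchor_positions sequences anchor_kmers k (find_anchor_positions sequences anchor_kmers k)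

-- ===== LEMMAS AND PROOFS =====

-- A's fold is the identity when no k-mer occurs
theorem foldA_of_all_neg (su : String) (kmers : List String) (acc : Option Int)
    (h : ∀ km ∈ kmers, PySem.Chars.find su.toList km.toList = -1) :
    kmers.foldl (pvStepA su) acc = acc := by
  induction kmers generalizing acc with
  | nil => rfl
  | cons km rest ih =>
    have hk := h km (by simp)
    have hstep : pvStepA su acc km = acc := by
      simp [pvStepA, PySem.Str.find_eq, hk]
    rw [List.foldl_cons, hstep]
    exact ih acc (fun km hm => h km (by simp [hm]))

-- A's fold lands on the minimum m if m is attained and is a lower bound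
theorem foldA_min (su : String) (m : Int) (hm : 0 ≤ m) :
    ∀ (kmers : List String) (acc : Option Int),
    (∀ km ∈ kmers, PySem.Chars.find su.toList km.toList = -1 ∨ m ≤ PySem.Chars.find su.toList km.toList) →
    ((∃ km ∈ kmers, PySem.Chars.find su.toList km.toList = m) ∨ acc = some m) →
    (∀ b, acc = some b → m ≤ b) →
    kmers.foldl (pvStepA su) acc = some m := by
  intro kmers
  induction kmers with
  | nil =>
    intro acc _ hex _
    rcases hex with ⟨km, hmem, _⟩ | hacc
    · simp at hmem
    · simpa using hacc
  | cons km rest ih =>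
    intro acc hlb hex hge
    have hlbk := hlb km (by simp)
    rw [List.foldl_cons]
    by_cases hneg : PySem.Chars.find su.toList km.toList = -1
    · -- k-mer absent: acc unchanged
      have hstep : pvStepA su acc km = acc := by
        simp [pvStepA, PySem.Str.find_eq, hneg]
      rw [hstep]
      apply ih acc (fun kk hk => hlb kk (by simp [hk]))
      · rcases hex with ⟨k0, hk0, hfk0⟩ | hacc
        · rcases List.mem_cons.mp hk0 with h | h
          · exfalso; rw [h] at hfk0; rw [hfk0] at hneg; omega
          · exact Or.inl ⟨k0, h, hfk0⟩
        · exact Or.inr hacc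
      · exact hge
    · -- k-mer present: its find is ≥ m
      have hmlep : m ≤ PySem.Chars.find su.toList km.toList := hlbk.resolve_left hneg
      have hstep : ∃ b', pvStepA su acc km = some b' ∧ m ≤ b' ∧
          (acc = some m → b' = m) ∧ (PySem.Chars.find su.toList km.toList = m → b' = m) := by
        cases acc with
        | none =>
          refine ⟨PySem.Chars.find su.toList km.toList, ?_, hmlep, ?_, fun h => h⟩
          · simp [pvStepA, PySem.Str.find_eq, hneg]
          · intro h; cases h
        | some b =>
          have hmb : m ≤ b := hge b rfl
          by_cases hlt : PySem.Chars.find su.toList km.toList < b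
          · refine ⟨PySem.Chars.find su.toList km.toList, ?_, hmlep, ?_, fun h => h⟩
            · simp [pvStepA, PySem.Str.find_eq, hneg, hlt]
            · intro h; injection h with h; omega
          · refine ⟨b, ?_, hmb, fun h => by injection h, fun h => by omega⟩
            simp [pvStepA, PySem.Str.find_eq, hneg, hlt]
      obtain ⟨b', hb', hmb', haccm, hposm⟩ := hstep
      rw [hb']
      apply ih (some b') (fun kk hk => hlb kk (by simp [hk]))
      · rcases hex with ⟨k0, hk0, hfk0⟩ | hacc
        · rcases List.mem_cons.mp hk0 with h | h
          · right; rw [hposm (by rw [← h]; exact hfk0)]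
          · exact Or.inl ⟨k0, h, hfk0⟩
        · right; rw [haccm hacc]
      · intro b hb; injection hb with hb; omega

-- find? on a range returns the least index satisfying the predicate
theorem find?_range_some {n i : Nat} {p : Nat → Bool}
    (h : (List.range n).find? p = some i) :
    p i = true ∧ ∀ j < i, p j = false := by
  obtain ⟨hpi, as, bs, heq, hall⟩ := List.find?_eq_some_iff_append.mp h
  have hlen : as.length < n := by
    have := congrArg List.length heq
    simp at this; omega
  have htake : as = List.range as.length := by
    have h1 : (List.range n).take as.length = as := by
      rw [heq]; simp
    rw [List.take_range, Nat.min_eq_left (le_of_lt hlen)] at h1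
    exact h1.symm
  have hi : i = as.length := by
    have h2 : (as ++ i :: bs)[as.length]? = some i := by simp
    rw [← heq] at h2
    have h3 : (List.range n)[as.length]? = some as.length := by
      simp [hlen]
    exact Option.some_injective _ (h2.symm.trans h3)
  refine ⟨hpi, fun j hj => ?_⟩
  have hjm : j ∈ as := by
    rw [htake, List.mem_range]; omega
  have := hall j hjm
  simpa using this

-- membership form of the inner any
theorem hasAnchorAt_iff (su : List Char) (kmers : List String) (i : Nat) :
    pvHasAnchorAt su kmers i = true ↔ ∃ km ∈ kmers, km.toList <+: su.drop i := by
  simp [pvHasAnchorAt]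

-- per-sequence equality
theorem perSeq_eq (su : String) (kmers : List String) :
    kmers.foldl (pvStepA su) none =
    ((List.range (su.toList.length + 1)).find? (fun i => pvHasAnchorAt su.toList kmers i)).map
      (fun i => (i : Int)) := by
  cases hr : (List.range (su.toList.length + 1)).find? (fun i => pvHasAnchorAt su.toList kmers i) with
  | none =>
    -- no offset matches: every find is -1
    have hnone := List.find?_eq_none.mp hr
    have hall : ∀ km ∈ kmers, PySem.Chars.find su.toList km.toList = -1 := by
      intro km hkm
      by_contra hne
      have h0 : 0 ≤ PySem.Chars.find su.toList km.toList := by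
        have := PySem.Chars.neg_one_le_find su.toList km.toList
        omega
      obtain ⟨hpref, _⟩ := PySem.Chars.find_spec h0
      have hle : (PySem.Chars.find su.toList km.toList).toNat < su.toList.length + 1 := by
        have := PySem.Chars.find_le_length su.toList km.toList
        omega
      have := hnone _ (List.mem_range.mpr hle)
      exact this ((hasAnchorAt_iff _ _ _).mpr ⟨km, hkm, hpref⟩)
    simp [foldA_of_all_neg su kmers none hall]
  | some i =>
    obtain ⟨hpi, hmin⟩ := find?_range_some hr
    obtain ⟨km0, hkm0, hpref0⟩ := (hasAnchorAt_iff _ _ _).mp hpi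
    -- km0's find equals i
    have h00 : 0 ≤ PySem.Chars.find su.toList km0.toList := by
      rw [PySem.Chars.find_nonneg_iff]
      exact hpref0.isInfix.trans (List.drop_suffix i su.toList).isInfix
    obtain ⟨hprefF, hminF⟩ := PySem.Chars.find_spec h00
    have hleN : (PySem.Chars.find su.toList km0.toList).toNat ≤ su.toList.length := by
      have := PySem.Chars.find_le_length su.toList km0.toList; omega
    have htle : (PySem.Chars.find su.toList km0.toList).toNat ≤ i := by
      by_contra hgt
      exact hminF i (by omega) hpref0
    have htge : i ≤ (PySem.Chars.find su.toList km0.toList).toNat := by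
      by_contra hlt
      have hfalse := hmin (PySem.Chars.find su.toList km0.toList).toNat (by omega)
      rw [← Bool.not_eq_true, hasAnchorAt_iff] at hfalse
      exact hfalse ⟨km0, hkm0, hprefF⟩
    have hf0 : PySem.Chars.find su.toList km0.toList = (i : Int) := by omega
    -- every k-mer's find is -1 or ≥ i
    have hlb : ∀ km ∈ kmers, PySem.Chars.find su.toList km.toList = -1 ∨
        (i : Int) ≤ PySem.Chars.find su.toList km.toList := by
      intro km hkm
      by_cases hne : PySem.Chars.find su.toList km.toList = -1
      · exact Or.inl hne
      · right
        have h0 : 0 ≤ PySem.Chars.find su.toList km.toList := by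
          have := PySem.Chars.neg_one_le_find su.toList km.toList; omega
        obtain ⟨hpref, _⟩ := PySem.Chars.find_spec h0
        by_contra hlt
        have hfalse := hmin (PySem.Chars.find su.toList km.toList).toNat (by omega)
        rw [← Bool.not_eq_true, hasAnchorAt_iff] at hfalse
        exact hfalse ⟨km, hkm, hpref⟩
    have := foldA_min su (i : Int) (by omega) kmers none hlb
      (Or.inl ⟨km0, hkm0, hf0⟩) (fun b hb => by cases hb)
    simp [this]

-- ===== VERDICT (by name: the statement is the Claim_ definition above) =====
theorem find_anchor_positions_spec : Claim_equal_find_anchor_positions := by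
  intro sequences anchor_kmers k _
  unfold Spec_find_anchor_positions find_anchor_positions find_anchor_positions_alt
  refine List.map_congr_left (fun seq _ => ?_)
  exact perSeq_eq (PySem.Str.upper seq) anchor_kmers
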